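-- pv_equiv track=rewrite | github.com/ploytanat/168innovative | scripts/wp_dump_to_innova_core.py | split_rows
-- ===== SOURCE A (Python) =====
-- def split_rows(values: str) -> list[str]:
--     rows: list[str] = []
--     in_str = False
--     escape = False
--     depth = 0
--     start: int | None = None
--
--     for index, ch in enumerate(values):
--         if in_str:
--             if escape:
--                 escape = False
--             elif ch == "\\":
--                 escape = True
--             elif ch == "'":
--                 in_str = False
--             continue
--
--         if ch == "'":
--             in_str = True
--         elif ch == "(":
--             if depth == 0:
--                 start = index + 1
--             depth += 1
--         elif ch == ")":
--             depth -= 1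
--             if depth == 0 and start is not None:
--                 rows.append(values[start:index])
--                 start = None
--
--     return rows
-- ===== SOURCE B (Python) =====
-- def split_rows(values: str) -> list[str]:
--     rows: list[str] = []
--     n = len(values)
--     depth = 0
--     start = None
--     i = 0
--     while i < n:
--         ch = values[i]
--         if ch == "'":
--             j = i + 1
--             while j < n:
--                 if values[j] == "\\":
--                     j += 2
--                 elif values[j] == "'":
--                     j += 1
--                     break
--                 else:
--                     j += 1
--             i = j
--             continue
--         if ch == "(":
--             if depth == 0:
--                 start = i + 1
--             depth += 1
--         elif ch == ")":
--             depth -= 1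
--             if depth == 0 and start is not None:
--                 rows.append(values[start:i])
--                 start = None
--         i += 1
--     return rows
-- ===== Notes on version B (the rewrite author's own statement) =====
-- stated objective: alternative
-- what changed: Replaces A's single character-at-a-time automaton with in_str/escape boolean flags by an explicit-index outer while loop that, on a quote, runs an inner loop jumping over the whole string literal (advancing 2 past backslashes), so only depth/start remain as outer state.
import Mathlib
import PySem

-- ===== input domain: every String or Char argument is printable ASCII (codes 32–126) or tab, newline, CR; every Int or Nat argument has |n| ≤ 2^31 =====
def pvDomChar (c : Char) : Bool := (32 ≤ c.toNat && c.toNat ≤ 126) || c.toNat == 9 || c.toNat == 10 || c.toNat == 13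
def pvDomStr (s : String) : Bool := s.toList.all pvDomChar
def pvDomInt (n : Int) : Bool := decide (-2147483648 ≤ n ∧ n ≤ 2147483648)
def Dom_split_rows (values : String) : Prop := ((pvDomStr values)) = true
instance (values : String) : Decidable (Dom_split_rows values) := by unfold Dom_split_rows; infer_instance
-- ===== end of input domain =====

-- B replaces A's in_str/escape flag automaton by an outer index loop with an inner
-- literal-skipping loop (alternative decomposition, same O(n) cost).

-- ===== PORT A =====
-- state: (rows, in_str, escape, depth, start)
def splitRowsStepA (cs : List Char) (st : List String × Bool × Bool × Int × Option Int)
    (p : Int × Char) : List String × Bool × Bool × Int × Option Int :=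
  let (rows, in_str, escape, depth, start) := st
  let (index, ch) := p
  if in_str then
    if escape then (rows, in_str, false, depth, start)
    else if ch = '\\' then (rows, in_str, true, depth, start)
    else if ch = '\'' then (rows, false, escape, depth, start)
    else (rows, in_str, escape, depth, start)
  else
    if ch = '\'' then (rows, true, escape, depth, start)
    else if ch = '(' then
      let start' := if depth = 0 then some (index + 1) else start
      (rows, in_str, escape, depth + 1, start')
    else if ch = ')' then
      let depth' := depth - 1
      if depth' = 0 then
        match start with
        | some s =>
            (rows ++ [String.ofList (PySem.List.slice cs (some s) (some index))],
             in_str, escape, depth', none)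
        | none => (rows, in_str, escape, depth', start)
      else (rows, in_str, escape, depth', start)
    else (rows, in_str, escape, depth, start)

def split_rows (values : String) : List String :=
  ((PySem.List.enumerate values.toList 0).foldl (splitRowsStepA values.toList)
    ([], false, false, 0, none)).1

-- ===== PORT B =====
-- inner while loop: advance past the string literal opened just before position j.
-- fuel is a totality guard only: each iteration moves j forward, so fuel = cs.length
-- (passed by split_rows_alt) never runs out while j < cs.length.
def splitRowsSkip (cs : List Char) (fuel : Nat) (j : Nat) : Nat :=
  match fuel with
  | 0 => j
  | f + 1 =>
    if h : j < cs.length then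
      if cs[j] = '\\' then splitRowsSkip cs f (j + 2)
      else if cs[j] = '\'' then j + 1
      else splitRowsSkip cs f (j + 1)
    else j

-- outer while loop (fuel: same totality guard)
def splitRowsLoop (cs : List Char) (fuel : Nat) (rows : List String) (depth : Int)
    (start : Option Int) (i : Nat) : List String :=
  match fuel with
  | 0 => rows
  | f + 1 =>
    if h : i < cs.length then
      let ch := cs[i]
      if ch = '\'' then splitRowsLoop cs f rows depth start (splitRowsSkip cs f (i + 1))
      else if ch = '(' then
        splitRowsLoop cs f rows (depth + 1)
          (if depth = 0 then some ((i : Int) + 1) else start) (i + 1)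
      else if ch = ')' then
        let depth' := depth - 1
        if depth' = 0 then
          match start with
          | some s =>
              splitRowsLoop cs f
                (rows ++ [String.ofList (PySem.List.slice cs (some s) (some (i : Int)))])
                depth' none (i + 1)
          | none => splitRowsLoop cs f rows depth' start (i + 1)
        else splitRowsLoop cs f rows depth' start (i + 1)
      else splitRowsLoop cs f rows depth start (i + 1)
    else rows

def split_rows_alt (values : String) : List String :=
  splitRowsLoop values.toList values.toList.length [] 0 none 0

-- ===== PRECONDITION & SPEC =====
def Spec_split_rows (values : String) (out : List String) : Prop := out = split_rows_alt values
instance (values : String) (out : List String) : Decidable (Spec_split_rows values out) := by unfold Spec_split_rows; infer_instance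

-- ===== CLAIM (what is proved, stated in full; the proofs are below) =====
def Claim_equal_split_rows : Prop := ∀ (values : String), Dom_split_rows values → Spec_split_rows values (split_rows values)

-- ===== LEMMAS AND PROOFS =====

-- enumerate of the suffix of cs starting at i, with matching Python indices
def enumFrom (cs : List Char) (i : Nat) : List (Int × Char) :=
  PySem.List.enumerate (cs.drop i) (i : Int)

theorem enumFrom_cons (cs : List Char) (i : Nat) (h : i < cs.length) :
    enumFrom cs i = ((i : Int), cs[i]) :: enumFrom cs (i + 1) := by
  unfold enumFrom
  rw [List.drop_eq_getElem_cons h, PySem.List.enumerate_cons]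
  push_cast
  rfl

theorem enumFrom_nil (cs : List Char) (i : Nat) (h : cs.length ≤ i) :
    enumFrom cs i = [] := by
  unfold enumFrom
  rw [List.drop_eq_nil_of_le h, PySem.List.enumerate_nil]

theorem splitRowsSkip_ge (cs : List Char) (fuel j : Nat) : j ≤ splitRowsSkip cs fuel j := by
  fun_induction splitRowsSkip cs fuel j with
  | case1 => omega
  | case2 j f h hb ih => omega
  | case3 => omega
  | case4 j f h hb hq ih => omega
  | case5 => omega

-- one escape step: in_str with escape set just consumes the next character
theorem foldA_escape (cs : List Char) (k : Nat) (rows : List String) (d : Int)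
    (s : Option Int) :
    ((enumFrom cs k).foldl (splitRowsStepA cs) (rows, true, true, d, s)).1
      = ((enumFrom cs (k + 1)).foldl (splitRowsStepA cs) (rows, true, false, d, s)).1 := by
  by_cases h : k < cs.length
  · rw [enumFrom_cons cs k h]
    simp [splitRowsStepA]
  · rw [enumFrom_nil cs k (by omega), enumFrom_nil cs (k + 1) (by omega)]
    rfl

-- in-string mode: A's fold from j equals A's fold in normal mode from splitRowsSkip cs fuel j
theorem foldA_instr (cs : List Char) (fuel j : Nat) (rows : List String) (d : Int)
    (s : Option Int) (hf : cs.length ≤ j + fuel) :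
    ((enumFrom cs j).foldl (splitRowsStepA cs) (rows, true, false, d, s)).1
      = ((enumFrom cs (splitRowsSkip cs fuel j)).foldl (splitRowsStepA cs)
          (rows, false, false, d, s)).1 := by
  fun_induction splitRowsSkip cs fuel j with
  | case1 j =>
      rw [enumFrom_nil cs j (by omega)]
      rfl
  | case2 j f h hb ih =>
      rw [enumFrom_cons cs j h, List.foldl_cons,
        show splitRowsStepA cs (rows, true, false, d, s) ((j : Int), cs[j])
            = (rows, true, true, d, s) by simp [splitRowsStepA, hb]]
      rw [foldA_escape cs (j + 1) rows d s]
      exact ih (by omega)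
  | case3 j f h hb hq =>
      rw [enumFrom_cons cs j h]
      simp [splitRowsStepA, hq]
  | case4 j f h hb hq ih =>
      rw [enumFrom_cons cs j h, List.foldl_cons,
        show splitRowsStepA cs (rows, true, false, d, s) ((j : Int), cs[j])
            = (rows, true, false, d, s) by simp [splitRowsStepA, hb, hq]]
      exact ih (by omega)
  | case5 j f h =>
      rw [enumFrom_nil cs j (by omega)]
      rfl

-- main invariant: A's fold from i in normal mode equals B's loop from i
theorem foldA_eq_loop (cs : List Char) (fuel i : Nat) (rows : List String) (d : Int)
    (s : Option Int) (hf : cs.length ≤ i + fuel) :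
    ((enumFrom cs i).foldl (splitRowsStepA cs) (rows, false, false, d, s)).1
      = splitRowsLoop cs fuel rows d s i := by
  fun_induction splitRowsLoop cs fuel rows d s i with
  | case1 rows d s i =>
      rw [enumFrom_nil cs i (by omega)]
      rfl
  | case2 rows d s i f hlt ch hq ih =>
      rw [enumFrom_cons cs i hlt, List.foldl_cons,
        show splitRowsStepA cs (rows, false, false, d, s) ((i : Int), cs[i])
            = (rows, true, false, d, s) by
          simp [splitRowsStepA, show cs[i] = '\'' from hq]]
      rw [foldA_instr cs f (i + 1) rows d s (by omega)]
      exact ih (by have := splitRowsSkip_ge cs f (i + 1); omega)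
  | case3 rows d s i f hlt ch hq hp ih =>
      rw [enumFrom_cons cs i hlt, List.foldl_cons,
        show splitRowsStepA cs (rows, false, false, d, s) ((i : Int), cs[i])
            = (rows, false, false, d + 1, if d = 0 then some ((i : Int) + 1) else s) by
          simp [splitRowsStepA, show cs[i] = '(' from hp]]
      simpa using ih (by omega)
  | case4 rows d i f hlt ch hq hp hc dp hd s ih =>
      rw [enumFrom_cons cs i hlt, List.foldl_cons,
        show splitRowsStepA cs (rows, false, false, d, some s) ((i : Int), cs[i])
            = (rows ++ [String.ofList (PySem.List.slice cs (some s) (some (i : Int)))],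
               false, false, d - 1, none) by
          simp [splitRowsStepA, show cs[i] = ')' from hc, show d - 1 = 0 from hd]]
      exact ih (by omega)
  | case5 rows d i f hlt ch hq hp hc dp hd ih =>
      rw [enumFrom_cons cs i hlt, List.foldl_cons,
        show splitRowsStepA cs (rows, false, false, d, none) ((i : Int), cs[i])
            = (rows, false, false, d - 1, none) by
          simp [splitRowsStepA, show cs[i] = ')' from hc]]
      exact ih (by omega)
  | case6 rows d s i f hlt ch hq hp hc dp hd ih =>
      rw [enumFrom_cons cs i hlt, List.foldl_cons,
        show splitRowsStepA cs (rows, false, false, d, s) ((i : Int), cs[i])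
            = (rows, false, false, d - 1, s) by
          simp [splitRowsStepA, show cs[i] = ')' from hc]
          intro hh
          exact absurd hh hd]
      exact ih (by omega)
  | case7 rows d s i f hlt ch hq hp hc ih =>
      rw [enumFrom_cons cs i hlt, List.foldl_cons,
        show splitRowsStepA cs (rows, false, false, d, s) ((i : Int), cs[i])
            = (rows, false, false, d, s) by
          simp [splitRowsStepA, eq_false (show ¬cs[i] = '\'' from hq),
            eq_false (show ¬cs[i] = '(' from hp), eq_false (show ¬cs[i] = ')' from hc)]]
      exact ih (by omega)
  | case8 rows d s i f hlt =>
      rw [enumFrom_nil cs i (by omega)]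
      rfl

-- ===== VERDICT (by name: the statement is the Claim_ definition above) =====
theorem split_rows_spec : Claim_equal_split_rows := by
  intro values _
  unfold Spec_split_rows split_rows split_rows_alt
  have h0 : PySem.List.enumerate values.toList 0 = enumFrom values.toList 0 := by
    unfold enumFrom
    rfl
  rw [h0, foldA_eq_loop values.toList values.toList.length 0 [] 0 none (by omega)]
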